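-- pv_equiv track=rewrite | github.com/olinicholson/tp1_td5 | programacion_dinamica.py | prog_dinamica_4
-- ===== SOURCE A (Python) =====
-- def prog_dinamica_4(instancia, m, gpus_solicitadas, beneficios,
--                     gpus_por_maquina1, gpus_por_maquina2, gpus_por_maquina3, gpus_por_maquina4, s,
--                     max_beneficio, memo):
--     #Caso base: cuando hemos considerado todas las instancias
--     if instancia == len(gpus_solicitadas):
--         return 0 #el beneficio es 0
--
--     #Si ya hemos calculado este subproblema, devolver el resultado almacenado
--     if memo[instancia][gpus_por_maquina1][gpus_por_maquina2] [gpus_por_maquina3][gpus_por_maquina4]!= -1: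
--         return memo[instancia][gpus_por_maquina1][gpus_por_maquina2][gpus_por_maquina3][gpus_por_maquina4]
--
--     #Opción 1: No asignar la instancia actual a ninguna máquina
--     beneficio_no_asignar = prog_dinamica_4(instancia + 1, m, gpus_solicitadas, beneficios, gpus_por_maquina1, gpus_por_maquina2, gpus_por_maquina3,gpus_por_maquina4, s, max_beneficio, memo)
--
--     #Opción 2: Asignar la instancia a la máquina 1 si es posible
--     beneficio_asignar_maquina1 = 0
--     if gpus_solicitadas[instancia] <= gpus_por_maquina1:
--         beneficio_asignar_maquina1 = beneficios[instancia] + prog_dinamica_4(instancia + 1, m, gpus_solicitadas, beneficios,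
--                             gpus_por_maquina1 - gpus_solicitadas[instancia], gpus_por_maquina2, gpus_por_maquina3,gpus_por_maquina4, s,
--                             max_beneficio, memo)
--
--     #Opción 3: Asignar la instancia a la máquina 2 si es posible
--     beneficio_asignar_maquina2 = 0
--     if gpus_solicitadas[instancia] <= gpus_por_maquina2:
--         beneficio_asignar_maquina2 = beneficios[instancia] + prog_dinamica_4(instancia + 1, m, gpus_solicitadas, beneficios,
--                             gpus_por_maquina1, gpus_por_maquina2 - gpus_solicitadas[instancia], gpus_por_maquina3,gpus_por_maquina4,s,
--                             max_beneficio, memo)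
--
--     #Opción 4: Asignar la instancia a la máquina 3 si es posible
--     beneficio_asignar_maquina3 = 0
--     if gpus_solicitadas[instancia] <= gpus_por_maquina3:
--         beneficio_asignar_maquina3 = beneficios[instancia] + prog_dinamica_4(instancia + 1, m, gpus_solicitadas, beneficios,
--                             gpus_por_maquina1, gpus_por_maquina2, gpus_por_maquina3  - gpus_solicitadas[instancia],gpus_por_maquina4,s,
--                             max_beneficio, memo)
--
--     #Opción 4: Asignar la instancia a la máquina 4 si es posible
--     beneficio_asignar_maquina4 = 0
--     if gpus_solicitadas[instancia] <= gpus_por_maquina4: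
--         beneficio_asignar_maquina4 = beneficios[instancia] + prog_dinamica_4(instancia + 1, m, gpus_solicitadas, beneficios,
--                             gpus_por_maquina1, gpus_por_maquina2, gpus_por_maquina3 ,gpus_por_maquina4  - gpus_solicitadas[instancia],s,
--                             max_beneficio, memo)
--
--     #El máximo entre las opciones
--     mejor_beneficio = max({beneficio_no_asignar, beneficio_asignar_maquina1, beneficio_asignar_maquina2,  beneficio_asignar_maquina3, beneficio_asignar_maquina4})
--
--     #Guardamos el resultado
--     memo[instancia][gpus_por_maquina1][gpus_por_maquina2][gpus_por_maquina3][gpus_por_maquina4]  = mejor_beneficio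
--
--     #Actualizamos el máximo beneficio encontrado
--     max_beneficio = max(max_beneficio, mejor_beneficio)
--
--     return mejor_beneficio
-- ===== SOURCE B (Python) =====
-- # Bottom-up tabulation replacing A's memoized top-down recursion; respects pre-seeded
-- # memo cells (!= -1) but never mutates memo (A writes into memo in place; the
-- # equivalence claimed is about the return value only).
-- def prog_dinamica_4(instancia, m, gpus_solicitadas, beneficios,
--                     gpus_por_maquina1, gpus_por_maquina2, gpus_por_maquina3, gpus_por_maquina4, s,
--                     max_beneficio, memo):
--     n = len(gpus_solicitadas)
--     if instancia >= n:
--         return 0  # no instances left to consider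
--     R1, R2, R3, R4 = gpus_por_maquina1 + 1, gpus_por_maquina2 + 1, gpus_por_maquina3 + 1, gpus_por_maquina4 + 1
--     # row for i == n: no instances left, benefit 0 everywhere
--     nxt = [[[[0] * R4 for _ in range(R3)] for _ in range(R2)] for _ in range(R1)]
--     for i in range(n - 1, instancia - 1, -1):
--         req = gpus_solicitadas[i]
--         ben = beneficios[i]
--         mrow = memo[i]
--         nxt = [[[[_cell(mrow, nxt, req, ben, c1, c2, c3, c4)
--                   for c4 in range(R4)] for c3 in range(R3)] for c2 in range(R2)] for c1 in range(R1)]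
--     return nxt[gpus_por_maquina1][gpus_por_maquina2][gpus_por_maquina3][gpus_por_maquina4]
--
-- def _cell(mrow, nxt, req, ben, c1, c2, c3, c4):
--     v = mrow[c1][c2][c3][c4]
--     if v != -1:
--         return v
--     o1 = ben + nxt[c1 - req][c2][c3][c4] if req <= c1 else 0
--     o2 = ben + nxt[c1][c2 - req][c3][c4] if req <= c2 else 0
--     o3 = ben + nxt[c1][c2][c3 - req][c4] if req <= c3 else 0
--     o4 = ben + nxt[c1][c2][c3][c4 - req] if req <= c4 else 0
--     return max(nxt[c1][c2][c3][c4], o1, o2, o3, o4)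
-- ===== Notes on version B (the rewrite author's own statement) =====
-- stated objective: alternative
-- what changed: A's top-down memoized recursion that mutates the shared 5-level memo list is replaced by a bottom-up dynamic program that builds each table row i from row i+1 with the same recurrence (respecting pre-seeded memo cells != -1) and never mutates memo; the return-value equivalence only is claimed, since A writes results into memo in place.
-- outside the precondition, e.g. on prog_dinamica_4(0, 4, [1], [5], -1, 0, 0, 0, 0, 0, [[[[[-1]]]]]): A returns 0, B raises IndexError; on prog_dinamica_4(0, 4, [-1], [5], 0, 0, 0, 1, 0, 0, [[[[[-1, -1, -1]]]]]): A returns 5, B raises IndexError; on prog_dinamica_4(0, 0, [5], [], 0, 0, 0, 0, 0, 0, [[[[[-1]]]]]): A returns 0, B raises IndexError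
import Mathlib
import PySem

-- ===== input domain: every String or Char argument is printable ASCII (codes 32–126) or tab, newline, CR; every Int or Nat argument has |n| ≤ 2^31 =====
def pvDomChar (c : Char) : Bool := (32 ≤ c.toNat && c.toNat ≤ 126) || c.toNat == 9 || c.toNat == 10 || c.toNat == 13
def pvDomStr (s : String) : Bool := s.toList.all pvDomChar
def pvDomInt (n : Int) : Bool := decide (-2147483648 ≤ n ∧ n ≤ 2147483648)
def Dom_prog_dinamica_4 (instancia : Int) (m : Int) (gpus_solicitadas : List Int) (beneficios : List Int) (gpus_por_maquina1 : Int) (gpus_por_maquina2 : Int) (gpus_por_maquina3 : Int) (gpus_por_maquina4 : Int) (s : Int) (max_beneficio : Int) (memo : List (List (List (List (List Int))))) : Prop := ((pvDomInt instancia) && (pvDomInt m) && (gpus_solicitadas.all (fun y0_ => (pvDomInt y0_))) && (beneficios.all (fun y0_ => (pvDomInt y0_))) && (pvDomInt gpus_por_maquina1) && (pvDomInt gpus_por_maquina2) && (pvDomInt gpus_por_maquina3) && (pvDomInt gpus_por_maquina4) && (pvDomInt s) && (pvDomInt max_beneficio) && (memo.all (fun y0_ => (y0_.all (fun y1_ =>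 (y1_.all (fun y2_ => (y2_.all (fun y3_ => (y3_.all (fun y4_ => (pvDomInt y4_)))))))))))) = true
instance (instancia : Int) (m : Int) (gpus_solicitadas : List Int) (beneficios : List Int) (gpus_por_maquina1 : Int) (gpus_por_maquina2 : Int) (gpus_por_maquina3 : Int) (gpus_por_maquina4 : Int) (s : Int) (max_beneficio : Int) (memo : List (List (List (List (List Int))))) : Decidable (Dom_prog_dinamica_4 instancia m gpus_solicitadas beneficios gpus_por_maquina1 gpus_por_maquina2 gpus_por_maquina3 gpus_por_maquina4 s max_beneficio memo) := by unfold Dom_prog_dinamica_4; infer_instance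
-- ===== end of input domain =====

-- B replaces A's top-down memoized recursion by a bottom-up tabulation over the same
-- recurrence (objective: alternative decomposition, same asymptotic cost); A mutates
-- `memo` in place while B never writes to it, so the equivalence claimed here is about
-- the RETURN value only.

-- ===== PORT A =====
-- shared read/write helpers for the 5-level nested table (Python indexing, in-range under Pre_)
def pvGet4 (t : List (List (List (List Int)))) (a b c d : Nat) : Int :=
  (((t.getD a []).getD b []).getD c []).getD d 0

def pvGetC (memo : List (List (List (List (List Int))))) (i a b c d : Nat) : Int :=
  pvGet4 (memo.getD i []) a b c d

def pvSetC (memo : List (List (List (List (List Int))))) (i a b c d : Nat) (v : Int) :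
    List (List (List (List (List Int)))) :=
  memo.modify i (fun r1 => r1.modify a (fun r2 => r2.modify b (fun r3 => r3.modify c
    (fun r4 => r4.set d v))))

-- A's recursion, with the mutated memo threaded through as state; fuel makes the
-- recursion total (under Pre_ the fuel is exactly the number of remaining instances,
-- so the fuel-0 branch is never taken where Python returns).
def progA_go (gpus ben : List Int) (fuel : Nat) (i g1 g2 g3 g4 : Int)
    (memo : List (List (List (List (List Int))))) :
    Int × List (List (List (List (List Int)))) :=
  if i = (gpus.length : Int) then (0, memo)
  else
    let c := pvGetC memo i.toNat g1.toNat g2.toNat g3.toNat g4.toNat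
    if c ≠ -1 then (c, memo)
    else
      match fuel with
      | 0 => (0, memo)
      | fuel' + 1 =>
        let p0 := progA_go gpus ben fuel' (i + 1) g1 g2 g3 g4 memo
        let req := gpus.getD i.toNat 0
        let bi := ben.getD i.toNat 0
        let p1 := if req ≤ g1 then
            let q := progA_go gpus ben fuel' (i + 1) (g1 - req) g2 g3 g4 p0.2
            (bi + q.1, q.2)
          else (0, p0.2)
        let p2 := if req ≤ g2 then
            let q := progA_go gpus ben fuel' (i + 1) g1 (g2 - req) g3 g4 p1.2
            (bi + q.1, q.2)
          else (0, p1.2)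
        let p3 := if req ≤ g3 then
            let q := progA_go gpus ben fuel' (i + 1) g1 g2 (g3 - req) g4 p2.2
            (bi + q.1, q.2)
          else (0, p2.2)
        let p4 := if req ≤ g4 then
            let q := progA_go gpus ben fuel' (i + 1) g1 g2 g3 (g4 - req) p3.2
            (bi + q.1, q.2)
          else (0, p3.2)
        -- Python's max({...}) over the five candidates = left-nested binary max
        let mejor := max (max (max (max p0.1 p1.1) p2.1) p3.1) p4.1
        (mejor, pvSetC p4.2 i.toNat g1.toNat g2.toNat g3.toNat g4.toNat mejor)

def prog_dinamica_4 (instancia : Int) (m : Int) (gpus_solicitadas : List Int) (beneficios : List Int) (gpus_por_maquina1 : Int) (gpus_por_maquina2 : Int) (gpus_por_maquina3 : Int) (gpus_por_maquina4 : Int) (s : Int) (max_beneficio : Int) (memo : List (List (List (List (List Int))))) : Int :=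
  (progA_go gpus_solicitadas beneficios ((gpus_solicitadas.length : Int) - instancia).toNat
    instancia gpus_por_maquina1 gpus_por_maquina2 gpus_por_maquina3 gpus_por_maquina4 memo).1

-- ===== PORT B =====
-- one cell of the bottom-up table (Source B's _cell)
def pvCellB (mrow nxt : List (List (List (List Int)))) (req bi c1 c2 c3 c4 : Int) : Int :=
  let v := pvGet4 mrow c1.toNat c2.toNat c3.toNat c4.toNat
  if v ≠ -1 then v
  else
    let o1 := if req ≤ c1 then bi + pvGet4 nxt (c1 - req).toNat c2.toNat c3.toNat c4.toNat else 0
    let o2 := if req ≤ c2 then bi + pvGet4 nxt c1.toNat (c2 - req).toNat c3.toNat c4.toNat else 0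
    let o3 := if req ≤ c3 then bi + pvGet4 nxt c1.toNat c2.toNat (c3 - req).toNat c4.toNat else 0
    let o4 := if req ≤ c4 then bi + pvGet4 nxt c1.toNat c2.toNat c3.toNat (c4 - req).toNat else 0
    max (max (max (max (pvGet4 nxt c1.toNat c2.toNat c3.toNat c4.toNat) o1) o2) o3) o4

-- Source B's downward loop as structural recursion on the number of remaining rows:
-- fuel = 0 is the all-zero row for i = n, fuel'+1 builds row i from row i+1.
def pvTabB (gpus ben : List Int) (memo : List (List (List (List (List Int)))))
    (g1 g2 g3 g4 : Int) (fuel : Nat) (i : Int) : List (List (List (List Int))) :=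
  match fuel with
  | 0 => List.replicate (g1 + 1).toNat (List.replicate (g2 + 1).toNat
      (List.replicate (g3 + 1).toNat (List.replicate (g4 + 1).toNat (0 : Int))))
  | fuel' + 1 =>
    let nxt := pvTabB gpus ben memo g1 g2 g3 g4 fuel' (i + 1)
    let req := gpus.getD i.toNat 0
    let bi := ben.getD i.toNat 0
    let mrow := memo.getD i.toNat []
    (List.range (g1 + 1).toNat).map (fun (c1 : Nat) =>
      (List.range (g2 + 1).toNat).map (fun (c2 : Nat) =>
        (List.range (g3 + 1).toNat).map (fun (c3 : Nat) =>
          (List.range (g4 + 1).toNat).map (fun (c4 : Nat) =>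
            pvCellB mrow nxt req bi (c1 : Int) (c2 : Int) (c3 : Int) (c4 : Int)))))

def prog_dinamica_4_alt (instancia : Int) (m : Int) (gpus_solicitadas : List Int) (beneficios : List Int) (gpus_por_maquina1 : Int) (gpus_por_maquina2 : Int) (gpus_por_maquina3 : Int) (gpus_por_maquina4 : Int) (s : Int) (max_beneficio : Int) (memo : List (List (List (List (List Int))))) : Int :=
  if (gpus_solicitadas.length : Int) ≤ instancia then 0
  else
  pvGet4 (pvTabB gpus_solicitadas beneficios memo gpus_por_maquina1 gpus_por_maquina2
      gpus_por_maquina3 gpus_por_maquina4 ((gpus_solicitadas.length : Int) - instancia).toNat instancia)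
    gpus_por_maquina1.toNat gpus_por_maquina2.toNat gpus_por_maquina3.toNat gpus_por_maquina4.toNat

-- ===== PRECONDITION & SPEC =====
-- Pre_ admits the base case instancia = len unconditionally and, for instancia < len,
-- excludes inputs on which Python's behaviour is accidental or a crash: negative
-- instancia/capacities/requested-GPU counts (negative-index wraparound can make A return
-- an arbitrary cell while B raises IndexError or disagrees), instancia beyond the list
-- (A recurses into an IndexError), and memo/beneficios tables too small for the visited
-- states (both programs generally raise IndexError there).
def Pre_prog_dinamica_4 (instancia : Int) (m : Int) (gpus_solicitadas : List Int) (beneficios : List Int) (gpus_por_maquina1 : Int) (gpus_por_maquina2 : Int) (gpus_por_maquina3 : Int) (gpus_por_maquina4 : Int) (s : Int) (max_beneficio : Int) (memo : List (List (List (List (List Int))))) : Prop :=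
  (decide (instancia = (gpus_solicitadas.length : Int)) ||
   (decide (0 ≤ instancia) && decide (instancia < (gpus_solicitadas.length : Int)) &&
    decide (0 ≤ gpus_por_maquina1) && decide (0 ≤ gpus_por_maquina2) &&
    decide (0 ≤ gpus_por_maquina3) && decide (0 ≤ gpus_por_maquina4) &&
    (gpus_solicitadas.drop instancia.toNat).all (fun x => decide (0 ≤ x)) &&
    decide ((gpus_solicitadas.length : Int) ≤ (beneficios.length : Int)) &&
    decide ((gpus_solicitadas.length : Int) ≤ (memo.length : Int)) &&
    ((memo.take gpus_solicitadas.length).drop instancia.toNat).all (fun r1 =>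
      decide (gpus_por_maquina1 + 1 ≤ (r1.length : Int)) &&
      r1.all (fun r2 => decide (gpus_por_maquina2 + 1 ≤ (r2.length : Int)) &&
        r2.all (fun r3 => decide (gpus_por_maquina3 + 1 ≤ (r3.length : Int)) &&
          r3.all (fun r4 => decide (gpus_por_maquina4 + 1 ≤ (r4.length : Int)))))))) = true
instance (instancia : Int) (m : Int) (gpus_solicitadas : List Int) (beneficios : List Int) (gpus_por_maquina1 : Int) (gpus_por_maquina2 : Int) (gpus_por_maquina3 : Int) (gpus_por_maquina4 : Int) (s : Int) (max_beneficio : Int) (memo : List (List (List (List (List Int))))) : Decidable (Pre_prog_dinamica_4 instancia m gpus_solicitadas beneficios gpus_por_maquina1 gpus_por_maquina2 gpus_por_maquina3 gpus_por_maquina4 s max_beneficio memo) := by unfold Pre_prog_dinamica_4; infer_instance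

def pvWitness_prog_dinamica_4 : Int × Int × List Int × List Int × Int × Int × Int × Int × Int × Int × List (List (List (List (List Int)))) :=
  (0, 0, [1], [2], 1, 0, 0, 0, 0, 0, [[[[[-1]]], [[[-1]]]]])

def Spec_prog_dinamica_4 (instancia : Int) (m : Int) (gpus_solicitadas : List Int) (beneficios : List Int) (gpus_por_maquina1 : Int) (gpus_por_maquina2 : Int) (gpus_por_maquina3 : Int) (gpus_por_maquina4 : Int) (s : Int) (max_beneficio : Int) (memo : List (List (List (List (List Int))))) (out : Int) : Prop := out = prog_dinamica_4_alt instancia m gpus_solicitadas beneficios gpus_por_maquina1 gpus_por_maquina2 gpus_por_maquina3 gpus_por_maquina4 s max_beneficio memo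
instance (instancia : Int) (m : Int) (gpus_solicitadas : List Int) (beneficios : List Int) (gpus_por_maquina1 : Int) (gpus_por_maquina2 : Int) (gpus_por_maquina3 : Int) (gpus_por_maquina4 : Int) (s : Int) (max_beneficio : Int) (memo : List (List (List (List (List Int))))) (out : Int) : Decidable (Spec_prog_dinamica_4 instancia m gpus_solicitadas beneficios gpus_por_maquina1 gpus_por_maquina2 gpus_por_maquina3 gpus_por_maquina4 s max_beneficio memo out) := by unfold Spec_prog_dinamica_4; infer_instance

-- ===== CLAIM (what is proved, stated in full; the proofs are below) =====
def Claim_equal_prog_dinamica_4 : Prop := ∀ (instancia : Int) (m : Int) (gpus_solicitadas : List Int) (beneficios : List Int) (gpus_por_maquina1 : Int) (gpus_por_maquina2 : Int) (gpus_por_maquina3 : Int) (gpus_por_maquina4 : Int) (s : Int) (max_beneficio : Int) (memo : List (List (List (List (List Int))))), Dom_prog_dinamica_4 instancia m gpus_solicitadas beneficios gpus_por_maquina1 gpus_por_maquina2 gpus_por_maquina3 gpus_por_maquina4 s max_beneficio memo → Pre_prog_dinamica_4 instancia m gpus_solicitadas beneficios gpus_por_maquina1 gpus_por_maquina2 gpus_por_maquina3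 gpus_por_maquina4 s max_beneficio memo → Spec_prog_dinamica_4 instancia m gpus_solicitadas beneficios gpus_por_maquina1 gpus_por_maquina2 gpus_por_maquina3 gpus_por_maquina4 s max_beneficio memo (prog_dinamica_4 instancia m gpus_solicitadas beneficios gpus_por_maquina1 gpus_por_maquina2 gpus_por_maquina3 gpus_por_maquina4 s max_beneficio memo)

-- ===== LEMMAS AND PROOFS =====

-- the common value function of the recurrence, reading the ORIGINAL memo only
def pvG (gpus ben : List Int) (memo0 : List (List (List (List (List Int)))))
    (fuel : Nat) (i c1 c2 c3 c4 : Int) : Int :=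
  if i = (gpus.length : Int) then 0
  else
    let v := pvGetC memo0 i.toNat c1.toNat c2.toNat c3.toNat c4.toNat
    if v ≠ -1 then v
    else
      match fuel with
      | 0 => 0
      | fuel' + 1 =>
        let req := gpus.getD i.toNat 0
        let bi := ben.getD i.toNat 0
        max (max (max (max (pvG gpus ben memo0 fuel' (i + 1) c1 c2 c3 c4)
          (if req ≤ c1 then bi + pvG gpus ben memo0 fuel' (i + 1) (c1 - req) c2 c3 c4 else 0))
          (if req ≤ c2 then bi + pvG gpus ben memo0 fuel' (i + 1) c1 (c2 - req) c3 c4 else 0))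
          (if req ≤ c3 then bi + pvG gpus ben memo0 fuel' (i + 1) c1 c2 (c3 - req) c4 else 0))
          (if req ≤ c4 then bi + pvG gpus ben memo0 fuel' (i + 1) c1 c2 c3 (c4 - req) else 0)

-- memo' is "consistent" with memo0: every cell is untouched or holds the recurrence
-- value of a cell that was -1 in memo0
def pvCons (gpus ben : List Int) (memo0 memo' : List (List (List (List (List Int))))) : Prop :=
  ∀ (i a b c d : Nat),
    pvGetC memo' i a b c d = pvGetC memo0 i a b c d ∨
    (pvGetC memo0 i a b c d = -1 ∧
      pvGetC memo' i a b c d =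
        pvG gpus ben memo0 (gpus.length - i) (i : Int) (a : Int) (b : Int) (c : Int) (d : Int))

theorem pv_getD_modify {α : Type} (l : List α) (n : Nat) (f : α → α) (k : Nat) (d : α) :
    (l.modify n f).getD k d = if k = n ∧ n < l.length then f (l.getD k d) else l.getD k d := by
  simp only [List.getD_eq_getElem?_getD, List.getElem?_modify]
  by_cases hk : n = k
  · subst hk
    by_cases hl : n < l.length
    · rw [List.getElem?_eq_getElem hl]; simp [hl]
    · rw [List.getElem?_eq_none (by omega)]
      simp [hl]
  · simp [hk, Ne.symm hk]

theorem pv_getD_set {α : Type} (l : List α) (n : Nat) (a : α) (k : Nat) (d : α) :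
    (l.set n a).getD k d = if k = n ∧ n < l.length then a else l.getD k d := by
  simp only [List.getD_eq_getElem?_getD, List.getElem?_set]
  by_cases hk : n = k
  · subst hk
    by_cases hl : n < l.length
    · simp [hl]
    · simp [hl, List.getElem?_eq_none (show l.length ≤ n by omega)]
  · simp [hk, Ne.symm hk]

theorem pv_getD_map_range {α : Type} (f : Nat → α) (n k : Nat) (d : α) (h : k < n) :
    ((List.range n).map f).getD k d = f k := by
  simp [List.getD_eq_getElem?_getD, h]

theorem pvGet4_zero (R1 R2 R3 R4 : Nat) (a b c d : Nat) :
    pvGet4 (List.replicate R1 (List.replicate R2 (List.replicate R3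
      (List.replicate R4 (0 : Int))))) a b c d = 0 := by
  unfold pvGet4
  by_cases h1 : a < R1 <;> by_cases h2 : b < R2 <;> by_cases h3 : c < R3 <;>
    by_cases h4 : d < R4 <;>
    simp [List.getD_eq_getElem?_getD, List.getElem?_replicate, h1, h2, h3, h4]

theorem pvGetC_pvSetC (memo : List (List (List (List (List Int))))) (i a b c d : Nat) (v : Int)
    (j a' b' c' d' : Nat) :
    pvGetC (pvSetC memo i a b c d v) j a' b' c' d' = pvGetC memo j a' b' c' d' ∨
    (j = i ∧ a' = a ∧ b' = b ∧ c' = c ∧ d' = d ∧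
      pvGetC (pvSetC memo i a b c d v) j a' b' c' d' = v) := by
  unfold pvGetC pvSetC pvGet4
  rw [pv_getD_modify]
  split_ifs with h1
  · obtain ⟨hj, _⟩ := h1
    rw [pv_getD_modify]
    split_ifs with h2
    · obtain ⟨ha, _⟩ := h2
      rw [pv_getD_modify]
      split_ifs with h3
      · obtain ⟨hb, _⟩ := h3
        rw [pv_getD_modify]
        split_ifs with h4
        · obtain ⟨hc, _⟩ := h4
          rw [pv_getD_set]
          split_ifs with h5
          · obtain ⟨hd, _⟩ := h5
            exact Or.inr ⟨hj, ha, hb, hc, hd, rfl⟩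
          · exact Or.inl rfl
        · exact Or.inl rfl
      · exact Or.inl rfl
    · exact Or.inl rfl
  · exact Or.inl rfl

theorem pvG_base (gpus ben : List Int) (memo0 : List (List (List (List (List Int)))))
    (fuel : Nat) (i c1 c2 c3 c4 : Int) (h : i = (gpus.length : Int)) :
    pvG gpus ben memo0 fuel i c1 c2 c3 c4 = 0 := by
  rw [pvG.eq_def]; simp [h]

theorem pvG_cached (gpus ben : List Int) (memo0 : List (List (List (List (List Int)))))
    (fuel : Nat) (i c1 c2 c3 c4 : Int) (h : ¬ i = (gpus.length : Int))
    (hc : pvGetC memo0 i.toNat c1.toNat c2.toNat c3.toNat c4.toNat ≠ -1) :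
    pvG gpus ben memo0 fuel i c1 c2 c3 c4 =
      pvGetC memo0 i.toNat c1.toNat c2.toNat c3.toNat c4.toNat := by
  rw [pvG.eq_def]; simp [h, hc]

theorem pvG_step (gpus ben : List Int) (memo0 : List (List (List (List (List Int)))))
    (fuel' : Nat) (i c1 c2 c3 c4 : Int) (h : ¬ i = (gpus.length : Int))
    (hc : pvGetC memo0 i.toNat c1.toNat c2.toNat c3.toNat c4.toNat = -1) :
    pvG gpus ben memo0 (fuel' + 1) i c1 c2 c3 c4 =
      max (max (max (max (pvG gpus ben memo0 fuel' (i + 1) c1 c2 c3 c4)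
        (if gpus.getD i.toNat 0 ≤ c1 then
          ben.getD i.toNat 0 + pvG gpus ben memo0 fuel' (i + 1) (c1 - gpus.getD i.toNat 0) c2 c3 c4 else 0))
        (if gpus.getD i.toNat 0 ≤ c2 then
          ben.getD i.toNat 0 + pvG gpus ben memo0 fuel' (i + 1) c1 (c2 - gpus.getD i.toNat 0) c3 c4 else 0))
        (if gpus.getD i.toNat 0 ≤ c3 then
          ben.getD i.toNat 0 + pvG gpus ben memo0 fuel' (i + 1) c1 c2 (c3 - gpus.getD i.toNat 0) c4 else 0))
        (if gpus.getD i.toNat 0 ≤ c4 then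
          ben.getD i.toNat 0 + pvG gpus ben memo0 fuel' (i + 1) c1 c2 c3 (c4 - gpus.getD i.toNat 0) else 0) := by
  conv_lhs => rw [pvG.eq_def]
  simp only [h, if_false, hc, ite_not]
  simp

theorem progA_base (gpus ben : List Int) (fuel : Nat) (i g1 g2 g3 g4 : Int)
    (memo : List (List (List (List (List Int))))) (h : i = (gpus.length : Int)) :
    progA_go gpus ben fuel i g1 g2 g3 g4 memo = (0, memo) := by
  rw [progA_go.eq_def]; simp [h]

theorem progA_cached (gpus ben : List Int) (fuel : Nat) (i g1 g2 g3 g4 : Int)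
    (memo : List (List (List (List (List Int))))) (h : ¬ i = (gpus.length : Int))
    (hc : pvGetC memo i.toNat g1.toNat g2.toNat g3.toNat g4.toNat ≠ -1) :
    progA_go gpus ben fuel i g1 g2 g3 g4 memo =
      (pvGetC memo i.toNat g1.toNat g2.toNat g3.toNat g4.toNat, memo) := by
  rw [progA_go.eq_def]; simp [h, hc]

theorem progA_eq (gpus ben : List Int) (memo0 : List (List (List (List (List Int)))))
    (iLow : Nat) (Hreq : ∀ k : Nat, iLow ≤ k → 0 ≤ gpus.getD k 0) :
    ∀ (fuel : Nat) (i g1 g2 g3 g4 : Int) (memo' : List (List (List (List (List Int))))),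
      0 ≤ i → iLow ≤ i.toNat → i + fuel = (gpus.length : Int) →
      0 ≤ g1 → 0 ≤ g2 → 0 ≤ g3 → 0 ≤ g4 →
      pvCons gpus ben memo0 memo' →
      (progA_go gpus ben fuel i g1 g2 g3 g4 memo').1 = pvG gpus ben memo0 fuel i g1 g2 g3 g4 ∧
      pvCons gpus ben memo0 (progA_go gpus ben fuel i g1 g2 g3 g4 memo').2 := by
  intro fuel
  induction fuel with
  | zero =>
    intro i g1 g2 g3 g4 memo' h0 hLow hsum hg1 hg2 hg3 hg4 hcons
    have hn : i = (gpus.length : Int) := by omega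
    rw [progA_base gpus ben 0 i g1 g2 g3 g4 memo' hn]
    exact ⟨(pvG_base gpus ben memo0 0 i g1 g2 g3 g4 hn).symm, hcons⟩
  | succ fuel' IH =>
    intro i g1 g2 g3 g4 memo' h0 hLow hsum hg1 hg2 hg3 hg4 hcons
    by_cases hn : i = (gpus.length : Int)
    · rw [progA_base gpus ben (fuel' + 1) i g1 g2 g3 g4 memo' hn]
      exact ⟨(pvG_base gpus ben memo0 (fuel' + 1) i g1 g2 g3 g4 hn).symm, hcons⟩
    have e0' : ((i.toNat : Int)) = i := Int.toNat_of_nonneg h0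
    have eg1 : ((g1.toNat : Int)) = g1 := Int.toNat_of_nonneg hg1
    have eg2 : ((g2.toNat : Int)) = g2 := Int.toNat_of_nonneg hg2
    have eg3 : ((g3.toNat : Int)) = g3 := Int.toNat_of_nonneg hg3
    have eg4 : ((g4.toNat : Int)) = g4 := Int.toNat_of_nonneg hg4
    have ef : gpus.length - i.toNat = fuel' + 1 := by omega
    by_cases hcc : pvGetC memo' i.toNat g1.toNat g2.toNat g3.toNat g4.toNat ≠ -1
    · rw [progA_cached gpus ben (fuel' + 1) i g1 g2 g3 g4 memo' hn hcc]
      refine ⟨?_, hcons⟩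
      rcases hcons i.toNat g1.toNat g2.toNat g3.toNat g4.toNat with heq | ⟨hz, heq⟩
      · rw [pvG_cached gpus ben memo0 (fuel' + 1) i g1 g2 g3 g4 hn (by rw [← heq]; exact hcc)]
        exact heq
      · rw [ef, e0', eg1, eg2, eg3, eg4] at heq
        exact heq
    push_neg at hcc
    have h0mem : pvGetC memo0 i.toNat g1.toNat g2.toNat g3.toNat g4.toNat = -1 := by
      rcases hcons i.toNat g1.toNat g2.toNat g3.toNat g4.toNat with heq | ⟨hz, _⟩
      · rw [← heq]; exact hcc
      · exact hz
    have hi1 : (0 : Int) ≤ i + 1 := by omega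
    have hLow1 : iLow ≤ (i + 1).toNat := by omega
    have hsum1 : i + 1 + (fuel' : Int) = (gpus.length : Int) := by
      push_cast at hsum ⊢; omega
    rw [progA_go.eq_def]
    rw [if_neg hn]
    simp only [hcc, ne_eq, not_true_eq_false, if_false, reduceCtorEq]
    set req := gpus.getD i.toNat 0 with hreqd
    set bi := ben.getD i.toNat 0 with hbid
    have hreq0 : 0 ≤ req := Hreq i.toNat hLow
    set A0 := progA_go gpus ben fuel' (i + 1) g1 g2 g3 g4 memo' with hA0
    obtain ⟨e0, c0⟩ := IH (i + 1) g1 g2 g3 g4 memo' hi1 hLow1 hsum1 hg1 hg2 hg3 hg4 hcons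
    rw [← hA0] at e0 c0
    set Q1 := progA_go gpus ben fuel' (i + 1) (g1 - req) g2 g3 g4 A0.2 with hQ1
    set P1 := (if req ≤ g1 then (bi + Q1.1, Q1.2) else ((0 : Int), A0.2)) with hP1
    have hstep1 : P1.1 = (if req ≤ g1 then bi + pvG gpus ben memo0 fuel' (i + 1) (g1 - req) g2 g3 g4 else 0) ∧
        pvCons gpus ben memo0 P1.2 := by
      by_cases hb : req ≤ g1
      · obtain ⟨e, c⟩ := IH (i + 1) (g1 - req) g2 g3 g4 A0.2 hi1 hLow1 hsum1 (by omega) hg2 hg3 hg4 c0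
        rw [← hQ1] at e c
        refine ⟨?_, ?_⟩
        · simp only [hP1, if_pos hb]; simp [e]
        · simp only [hP1, if_pos hb]; exact c
      · exact ⟨by simp [hP1, hb], by simp only [hP1, if_neg hb]; exact c0⟩
    set Q2 := progA_go gpus ben fuel' (i + 1) g1 (g2 - req) g3 g4 P1.2 with hQ2
    set P2 := (if req ≤ g2 then (bi + Q2.1, Q2.2) else ((0 : Int), P1.2)) with hP2
    have hstep2 : P2.1 = (if req ≤ g2 then bi + pvG gpus ben memo0 fuel' (i + 1) g1 (g2 - req) g3 g4 else 0) ∧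
        pvCons gpus ben memo0 P2.2 := by
      by_cases hb : req ≤ g2
      · obtain ⟨e, c⟩ := IH (i + 1) g1 (g2 - req) g3 g4 P1.2 hi1 hLow1 hsum1 hg1 (by omega) hg3 hg4 hstep1.2
        rw [← hQ2] at e c
        refine ⟨?_, ?_⟩
        · simp only [hP2, if_pos hb]; simp [e]
        · simp only [hP2, if_pos hb]; exact c
      · exact ⟨by simp [hP2, hb], by simp only [hP2, if_neg hb]; exact hstep1.2⟩
    set Q3 := progA_go gpus ben fuel' (i + 1) g1 g2 (g3 - req) g4 P2.2 with hQ3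
    set P3 := (if req ≤ g3 then (bi + Q3.1, Q3.2) else ((0 : Int), P2.2)) with hP3
    have hstep3 : P3.1 = (if req ≤ g3 then bi + pvG gpus ben memo0 fuel' (i + 1) g1 g2 (g3 - req) g4 else 0) ∧
        pvCons gpus ben memo0 P3.2 := by
      by_cases hb : req ≤ g3
      · obtain ⟨e, c⟩ := IH (i + 1) g1 g2 (g3 - req) g4 P2.2 hi1 hLow1 hsum1 hg1 hg2 (by omega) hg4 hstep2.2
        rw [← hQ3] at e c
        refine ⟨?_, ?_⟩
        · simp only [hP3, if_pos hb]; simp [e]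
        · simp only [hP3, if_pos hb]; exact c
      · exact ⟨by simp [hP3, hb], by simp only [hP3, if_neg hb]; exact hstep2.2⟩
    set Q4 := progA_go gpus ben fuel' (i + 1) g1 g2 g3 (g4 - req) P3.2 with hQ4
    set P4 := (if req ≤ g4 then (bi + Q4.1, Q4.2) else ((0 : Int), P3.2)) with hP4
    have hstep4 : P4.1 = (if req ≤ g4 then bi + pvG gpus ben memo0 fuel' (i + 1) g1 g2 g3 (g4 - req) else 0) ∧
        pvCons gpus ben memo0 P4.2 := by
      by_cases hb : req ≤ g4
      · obtain ⟨e, c⟩ := IH (i + 1) g1 g2 g3 (g4 - req) P3.2 hi1 hLow1 hsum1 hg1 hg2 hg3 (by omega) hstep3.2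
        rw [← hQ4] at e c
        refine ⟨?_, ?_⟩
        · simp only [hP4, if_pos hb]; simp [e]
        · simp only [hP4, if_pos hb]; exact c
      · exact ⟨by simp [hP4, hb], by simp only [hP4, if_neg hb]; exact hstep3.2⟩
    have hM : max (max (max (max A0.1 P1.1) P2.1) P3.1) P4.1 =
        pvG gpus ben memo0 (fuel' + 1) i g1 g2 g3 g4 := by
      rw [pvG_step gpus ben memo0 fuel' i g1 g2 g3 g4 hn h0mem, ← hreqd, ← hbid,
        e0, hstep1.1, hstep2.1, hstep3.1, hstep4.1]
    refine ⟨hM, ?_⟩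
    intro j a b c d
    rcases pvGetC_pvSetC P4.2 i.toNat g1.toNat g2.toNat g3.toNat g4.toNat
        (max (max (max (max A0.1 P1.1) P2.1) P3.1) P4.1) j a b c d with h | ⟨hj, ha, hb', hc', hd, hv⟩
    · rw [h]; exact hstep4.2 j a b c d
    · subst hj; subst ha; subst hb'; subst hc'; subst hd
      right
      refine ⟨h0mem, ?_⟩
      rw [hv, hM, ef, e0', eg1, eg2, eg3, eg4]

theorem tabB_eq (gpus ben : List Int) (memo : List (List (List (List (List Int)))))
    (g1 g2 g3 g4 : Int) (iLow : Nat) (Hreq : ∀ k : Nat, iLow ≤ k → 0 ≤ gpus.getD k 0)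
    (hg1 : 0 ≤ g1) (hg2 : 0 ≤ g2) (hg3 : 0 ≤ g3) (hg4 : 0 ≤ g4) :
    ∀ (fuel : Nat) (i : Int), 0 ≤ i → iLow ≤ i.toNat → i + fuel = (gpus.length : Int) →
      ∀ (c1 c2 c3 c4 : Int), 0 ≤ c1 → c1 ≤ g1 → 0 ≤ c2 → c2 ≤ g2 →
        0 ≤ c3 → c3 ≤ g3 → 0 ≤ c4 → c4 ≤ g4 →
        pvGet4 (pvTabB gpus ben memo g1 g2 g3 g4 fuel i) c1.toNat c2.toNat c3.toNat c4.toNat =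
          pvG gpus ben memo fuel i c1 c2 c3 c4 := by
  intro fuel
  induction fuel with
  | zero =>
    intro i h0 hLow hsum c1 c2 c3 c4 b1 b1' b2 b2' b3 b3' b4 b4'
    have hn : i = (gpus.length : Int) := by omega
    have ht : pvTabB gpus ben memo g1 g2 g3 g4 0 i =
        List.replicate (g1 + 1).toNat (List.replicate (g2 + 1).toNat
          (List.replicate (g3 + 1).toNat (List.replicate (g4 + 1).toNat (0 : Int)))) := rfl
    rw [ht, pvGet4_zero, pvG_base gpus ben memo 0 i c1 c2 c3 c4 hn]
  | succ fuel' IH =>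
    intro i h0 hLow hsum c1 c2 c3 c4 b1 b1' b2 b2' b3 b3' b4 b4'
    have hn : ¬ i = (gpus.length : Int) := by omega
    have hi1 : (0 : Int) ≤ i + 1 := by omega
    have hLow1 : iLow ≤ (i + 1).toNat := by omega
    have hsum1 : i + 1 + (fuel' : Int) = (gpus.length : Int) := by push_cast at hsum ⊢; omega
    have hreq0 : 0 ≤ gpus.getD i.toNat 0 := Hreq i.toNat hLow
    have EH := IH (i + 1) hi1 hLow1 hsum1
    have ht : pvTabB gpus ben memo g1 g2 g3 g4 (fuel' + 1) i =
        (List.range (g1 + 1).toNat).map (fun (c1 : Nat) =>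
          (List.range (g2 + 1).toNat).map (fun (c2 : Nat) =>
            (List.range (g3 + 1).toNat).map (fun (c3 : Nat) =>
              (List.range (g4 + 1).toNat).map (fun (c4 : Nat) =>
                pvCellB (memo.getD i.toNat []) (pvTabB gpus ben memo g1 g2 g3 g4 fuel' (i + 1))
                  (gpus.getD i.toNat 0) (ben.getD i.toNat 0)
                  (c1 : Int) (c2 : Int) (c3 : Int) (c4 : Int))))) := rfl
    rw [ht]
    unfold pvGet4
    rw [pv_getD_map_range _ ((g1 + 1).toNat) c1.toNat _ (by omega)]
    rw [pv_getD_map_range _ ((g2 + 1).toNat) c2.toNat _ (by omega)]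
    rw [pv_getD_map_range _ ((g3 + 1).toNat) c3.toNat _ (by omega)]
    rw [pv_getD_map_range _ ((g4 + 1).toNat) c4.toNat _ (by omega)]
    rw [Int.toNat_of_nonneg b1, Int.toNat_of_nonneg b2, Int.toNat_of_nonneg b3,
      Int.toNat_of_nonneg b4]
    set nxt := pvTabB gpus ben memo g1 g2 g3 g4 fuel' (i + 1) with hnxt
    set req := gpus.getD i.toNat 0 with hreqd
    set bi := ben.getD i.toNat 0 with hbid
    have hcell : pvGetC memo i.toNat c1.toNat c2.toNat c3.toNat c4.toNat =
        pvGet4 (memo.getD i.toNat []) c1.toNat c2.toNat c3.toNat c4.toNat := rfl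
    by_cases hcc : pvGet4 (memo.getD i.toNat []) c1.toNat c2.toNat c3.toNat c4.toNat ≠ -1
    · rw [pvG_cached gpus ben memo (fuel' + 1) i c1 c2 c3 c4 hn (by rw [hcell]; exact hcc)]
      rw [pvCellB.eq_def]
      simp only [hcc, if_true, ne_eq, not_false_eq_true, if_pos]
      rw [hcell]
    push_neg at hcc
    rw [pvG_step gpus ben memo fuel' i c1 c2 c3 c4 hn (by rw [hcell]; exact hcc), ← hreqd, ← hbid]
    rw [pvCellB.eq_def]
    simp only [hcc, ne_eq, not_true_eq_false, if_false, reduceCtorEq, ← hnxt, ← hreqd, ← hbid]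
    have o0 : pvGet4 nxt c1.toNat c2.toNat c3.toNat c4.toNat =
        pvG gpus ben memo fuel' (i + 1) c1 c2 c3 c4 :=
      EH c1 c2 c3 c4 b1 b1' b2 b2' b3 b3' b4 b4'
    have o1 : (if req ≤ c1 then bi + pvGet4 nxt (c1 - req).toNat c2.toNat c3.toNat c4.toNat else 0) =
        (if req ≤ c1 then bi + pvG gpus ben memo fuel' (i + 1) (c1 - req) c2 c3 c4 else 0) := by
      by_cases hb : req ≤ c1
      · rw [if_pos hb, if_pos hb, EH (c1 - req) c2 c3 c4 (by omega) (by omega) b2 b2' b3 b3' b4 b4']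
      · rw [if_neg hb, if_neg hb]
    have o2 : (if req ≤ c2 then bi + pvGet4 nxt c1.toNat (c2 - req).toNat c3.toNat c4.toNat else 0) =
        (if req ≤ c2 then bi + pvG gpus ben memo fuel' (i + 1) c1 (c2 - req) c3 c4 else 0) := by
      by_cases hb : req ≤ c2
      · rw [if_pos hb, if_pos hb, EH c1 (c2 - req) c3 c4 b1 b1' (by omega) (by omega) b3 b3' b4 b4']
      · rw [if_neg hb, if_neg hb]
    have o3 : (if req ≤ c3 then bi + pvGet4 nxt c1.toNat c2.toNat (c3 - req).toNat c4.toNat else 0) =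
        (if req ≤ c3 then bi + pvG gpus ben memo fuel' (i + 1) c1 c2 (c3 - req) c4 else 0) := by
      by_cases hb : req ≤ c3
      · rw [if_pos hb, if_pos hb, EH c1 c2 (c3 - req) c4 b1 b1' b2 b2' (by omega) (by omega) b4 b4']
      · rw [if_neg hb, if_neg hb]
    have o4 : (if req ≤ c4 then bi + pvGet4 nxt c1.toNat c2.toNat c3.toNat (c4 - req).toNat else 0) =
        (if req ≤ c4 then bi + pvG gpus ben memo fuel' (i + 1) c1 c2 c3 (c4 - req) else 0) := by
      by_cases hb : req ≤ c4
      · rw [if_pos hb, if_pos hb, EH c1 c2 c3 (c4 - req) b1 b1' b2 b2' b3 b3' (by omega) (by omega)]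
      · rw [if_neg hb, if_neg hb]
    rw [o0, o1, o2, o3, o4]

-- ===== VERDICT (by name: the statement is the Claim_ definition above) =====
theorem prog_dinamica_4_spec : Claim_equal_prog_dinamica_4 := by
  intro instancia m gpus ben g1 g2 g3 g4 s mb memo hdom hpre
  unfold Pre_prog_dinamica_4 at hpre
  simp only [Bool.or_eq_true, Bool.and_eq_true, decide_eq_true_eq, List.all_eq_true] at hpre
  rcases hpre with heq | hrest
  · show prog_dinamica_4 instancia m gpus ben g1 g2 g3 g4 s mb memo =
      prog_dinamica_4_alt instancia m gpus ben g1 g2 g3 g4 s mb memo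
    unfold prog_dinamica_4 prog_dinamica_4_alt
    rw [progA_base gpus ben (((gpus.length : Int) - instancia).toNat) instancia g1 g2 g3 g4 memo heq,
      if_pos (le_of_eq heq.symm)]
  obtain ⟨⟨⟨⟨⟨⟨⟨⟨⟨h0, hlt⟩, hg1⟩, hg2⟩, hg3⟩, hg4⟩, hreqmem⟩, -⟩, -⟩, -⟩ := hrest
  have hle : instancia ≤ (gpus.length : Int) := le_of_lt hlt
  have Hreq : ∀ k : Nat, instancia.toNat ≤ k → 0 ≤ gpus.getD k 0 := by
    intro k hk
    by_cases hkl : k < gpus.length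
    · have hg : gpus.getD k 0 = gpus[k] := by
        rw [List.getD_eq_getElem?_getD, List.getElem?_eq_getElem hkl]
        rfl
      rw [hg]
      apply hreqmem
      rw [List.mem_iff_getElem]
      refine ⟨k - instancia.toNat, by simp; omega, ?_⟩
      rw [List.getElem_drop]
      congr 1
      omega
    · rw [List.getD_eq_getElem?_getD, List.getElem?_eq_none (by omega)]
      simp
  have hsum : instancia + (((gpus.length : Int) - instancia).toNat : Int) = (gpus.length : Int) := by
    omega
  obtain ⟨eA, _⟩ := progA_eq gpus ben memo instancia.toNat Hreq
    ((gpus.length : Int) - instancia).toNat instancia g1 g2 g3 g4 memo h0 le_rfl hsum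
    hg1 hg2 hg3 hg4 (fun i a b c d => Or.inl rfl)
  have eB := tabB_eq gpus ben memo g1 g2 g3 g4 instancia.toNat Hreq hg1 hg2 hg3 hg4
    ((gpus.length : Int) - instancia).toNat instancia h0 le_rfl hsum
    g1 g2 g3 g4 hg1 le_rfl hg2 le_rfl hg3 le_rfl hg4 le_rfl
  show prog_dinamica_4 instancia m gpus ben g1 g2 g3 g4 s mb memo =
    prog_dinamica_4_alt instancia m gpus ben g1 g2 g3 g4 s mb memo
  unfold prog_dinamica_4 prog_dinamica_4_alt
  rw [if_neg (by omega : ¬ (gpus.length : Int) ≤ instancia), eA, eB]
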